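-- pv_equiv track=rewrite | github.com/hhhuang/ChineseWordSegmenter | chinese_word_segmenter/__init__.py | words_to_tags
-- ===== SOURCE A (Python) =====
-- def words_to_tags(words):
--     tags = []
--     for word in words:
--         if len(word) == 1:
--             tags.append('S')
--         else:
--             for i in range(len(word)):
--                 if i == 0:
--                     tags.append('L')
--                 elif i == len(word) - 1:
--                     tags.append('R')
--                 else:
--                     tags.append('M')
--     return tags
-- ===== SOURCE B (Python) =====
-- def words_to_tags(words):
--     tags = []
--     for word in words:
--         pending = None  # tag the most recent char would get if the word ended here
--         for _ch in word:
--             if pending is None: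
--                 pending = 'S'
--             else:
--                 # previous char turned out not to be last
--                 tags.append('L' if pending == 'S' else 'M')
--                 pending = 'R'
--         if pending is not None:
--             tags.append(pending)
--     return tags
-- ===== Notes on version B (the rewrite author's own statement) =====
-- stated objective: alternative
-- what changed: Replaces A's length/index-based positional branching by a streaming state machine with deferred emission: each character's tag is decided only when the next character arrives (upgrading S->L, R->M), and the pending tag of the last character is flushed after the word; no len() or index arithmetic is used.
import Mathlib
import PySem

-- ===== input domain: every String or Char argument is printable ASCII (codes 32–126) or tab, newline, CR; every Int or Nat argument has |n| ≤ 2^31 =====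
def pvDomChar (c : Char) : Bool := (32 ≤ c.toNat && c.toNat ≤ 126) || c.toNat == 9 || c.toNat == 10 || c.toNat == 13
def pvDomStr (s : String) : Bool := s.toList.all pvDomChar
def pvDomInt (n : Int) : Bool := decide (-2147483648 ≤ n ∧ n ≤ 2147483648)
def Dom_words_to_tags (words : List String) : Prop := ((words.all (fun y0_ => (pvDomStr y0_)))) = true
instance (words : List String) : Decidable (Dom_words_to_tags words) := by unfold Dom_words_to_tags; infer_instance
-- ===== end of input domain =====

-- B replaces A's length/index positional branching by a streaming state machine that
-- decides each tag only when the next character arrives (objective: alternative).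

-- ===== PORT A =====
def words_to_tags (words : List String) : List String :=
  words.foldl
    (fun tags word =>
      if PySem.Str.len word = 1 then tags ++ ["S"]
      else
        (PySem.List.pyRange 0 (PySem.Str.len word) 1).foldl
          (fun tags i =>
            if i = 0 then tags ++ ["L"]
            else if i = PySem.Str.len word - 1 then tags ++ ["R"]
            else tags ++ ["M"])
          tags)
    []

-- ===== PORT B =====
-- state: (tags so far, pending tag of the most recently seen char, none before the 1st char)
def words_to_tags_alt (words : List String) : List String :=
  words.foldl
    (fun tags word =>
      let st := word.toList.foldl
        (fun (st : List String × Option String) _ch =>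
          match st.2 with
          | none => (st.1, some "S")
          | some p => (st.1 ++ [if p = "S" then "L" else "M"], some "R"))
        (tags, none)
      match st.2 with
      | none => st.1
      | some p => st.1 ++ [p])
    []

-- ===== PRECONDITION & SPEC =====
def Spec_words_to_tags (words : List String) (out : List String) : Prop := out = words_to_tags_alt words
instance (words : List String) (out : List String) : Decidable (Spec_words_to_tags words out) := by unfold Spec_words_to_tags; infer_instance

-- ===== CLAIM (what is proved, stated in full; the proofs are below) =====
def Claim_equal_words_to_tags : Prop := ∀ (words : List String), Dom_words_to_tags words → Spec_words_to_tags words (words_to_tags words)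

-- ===== LEMMAS AND PROOFS =====

-- the B-side inner step function
def pvStep (st : List String × Option String) (_ch : Char) : List String × Option String :=
  match st.2 with
  | none => (st.1, some "S")
  | some p => (st.1 ++ [if p = "S" then "L" else "M"], some "R")

-- B inner loop from pending "R": every char emits an 'M'.
theorem pv_fromR (cs : List Char) : ∀ (ts : List String),
    cs.foldl pvStep (ts, some "R") = (ts ++ List.replicate cs.length "M", some "R") := by
  induction cs with
  | nil => intro ts; simp
  | cons c cs ih =>
    intro ts
    simp only [List.foldl_cons, pvStep]
    rw [ih]
    simp [List.replicate_succ]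

-- B inner loop from pending "S" on a nonempty rest: emits 'L' then middles.
theorem pv_fromS (c : Char) (cs : List Char) (ts : List String) :
    (c :: cs).foldl pvStep (ts, some "S") = (ts ++ ["L"] ++ List.replicate cs.length "M", some "R") := by
  simp only [List.foldl_cons, pvStep]
  rw [pv_fromR]
  simp

-- A's inner loop over range' k m (with k ≥ 1, k + m = n): m-1 middles then the final 'R'.
theorem pv_inner_tail (n : Nat) (hn : 2 ≤ n) :
    ∀ (m k : Nat), 1 ≤ m → 1 ≤ k → k + m = n → ∀ (tags : List String),
      (List.map (fun j : Nat => (j : Int)) (List.range' k m)).foldl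
        (fun tags i =>
          if i = 0 then tags ++ ["L"]
          else if i = (n : Int) - 1 then tags ++ ["R"]
          else tags ++ ["M"]) tags
      = tags ++ List.replicate (m - 1) "M" ++ ["R"] := by
  intro m
  induction m with
  | zero => omega
  | succ m ih =>
    intro k _ hk hkm tags
    rcases Nat.eq_zero_or_pos m with hm0 | hm1
    · subst hm0
      have hk' : k = n - 1 := by omega
      subst hk'
      have h1 : ((n - 1 : Nat) : Int) = (n : Int) - 1 := by omega
      simp [List.range'_one, h1]
      omega
    · rw [List.range'_succ]
      rw [List.map_cons, List.foldl_cons]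
      have h0 : ((k : Nat) : Int) ≠ 0 := by omega
      have h1 : ((k : Nat) : Int) ≠ (n : Int) - 1 := by omega
      rw [if_neg h0, if_neg h1]
      rw [ih (k + 1) hm1 (by omega) (by omega) (tags ++ ["M"])]
      have hrep : List.replicate (m + 1 - 1) "M" = "M" :: List.replicate (m - 1) "M" := by
        have h2 : m + 1 - 1 = (m - 1) + 1 := by omega
        rw [h2, List.replicate_succ]
      rw [hrep]
      simp

-- A's whole inner loop for a word of length n ≥ 2.
theorem pv_inner (n : Nat) (hn : 2 ≤ n) (tags : List String) :
    (PySem.List.pyRange 0 (n : Int) 1).foldl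
      (fun tags i =>
        if i = 0 then tags ++ ["L"]
        else if i = (n : Int) - 1 then tags ++ ["R"]
        else tags ++ ["M"]) tags
    = tags ++ (["L"] ++ List.replicate (n - 2) "M" ++ ["R"]) := by
  rw [PySem.List.pyRange_zero_natCast]
  have hr : List.range n = 0 :: List.range' 1 (n - 1) := by
    rw [List.range_eq_range']
    have : n = (n - 1) + 1 := by omega
    rw [this, List.range'_succ]
    congr 1
  rw [hr, List.map_cons, List.foldl_cons]
  have h0 : ((0 : Nat) : Int) = 0 := by norm_num
  rw [h0, if_pos rfl]
  rw [pv_inner_tail n hn (n - 1) 1 (by omega) (by omega) (by omega) (tags ++ ["L"])]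
  have : n - 1 - 1 = n - 2 := by omega
  rw [this]
  simp

-- Per-word step agreement.
theorem pv_step_eq (tags : List String) (word : String) :
    (if PySem.Str.len word = 1 then tags ++ ["S"]
     else
       (PySem.List.pyRange 0 (PySem.Str.len word) 1).foldl
         (fun tags i =>
           if i = 0 then tags ++ ["L"]
           else if i = PySem.Str.len word - 1 then tags ++ ["R"]
           else tags ++ ["M"])
         tags)
    = (let st := word.toList.foldl pvStep (tags, none)
       match st.2 with
       | none => st.1
       | some p => st.1 ++ [p]) := by
  rw [PySem.Str.len_eq]
  cases hw : word.toList with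
  | nil => simp [PySem.List.pyRange]
  | cons c cs =>
    cases hcs : cs with
    | nil => simp [pvStep]
    | cons c2 cs2 =>
      have hn : 2 ≤ (c :: c2 :: cs2).length := by simp
      have hlen : ((c :: c2 :: cs2).length : Int) ≠ 1 := by
        simp; omega
      rw [if_neg hlen]
      rw [pv_inner _ hn tags]
      rw [List.foldl_cons]
      have h1 : pvStep (tags, none) c = (tags, some "S") := rfl
      rw [h1, pv_fromS c2 cs2 tags]
      simp

theorem pv_folds (words : List String) (tags : List String) :
    words.foldl
      (fun tags word =>
        if PySem.Str.len word = 1 then tags ++ ["S"]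
        else
          (PySem.List.pyRange 0 (PySem.Str.len word) 1).foldl
            (fun tags i =>
              if i = 0 then tags ++ ["L"]
              else if i = PySem.Str.len word - 1 then tags ++ ["R"]
              else tags ++ ["M"])
            tags)
      tags
    = words.foldl
        (fun tags word =>
          let st := word.toList.foldl pvStep (tags, none)
          match st.2 with
          | none => st.1
          | some p => st.1 ++ [p])
        tags := by
  induction words generalizing tags with
  | nil => rfl
  | cons w ws ih =>
    simp only [List.foldl_cons]
    rw [pv_step_eq tags w, ih]

-- ===== VERDICT (by name: the statement is the Claim_ definition above) =====
theorem words_to_tags_spec : Claim_equal_words_to_tags := by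
  intro words _
  unfold Spec_words_to_tags words_to_tags words_to_tags_alt
  exact pv_folds words []
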